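-- pv_equiv track=rewrite | github.com/7HemiCuda1/NewRelic_Exporter | backend/HelperFunctions/DictMethods.py | dictionary_difference
-- ===== SOURCE A (Python) =====
-- def dictionary_difference(d1, d2):
--     """(dict, dict) -> lst
--
--     Returns a list of keys that are "new" to d2 or whose values in d2 are
--     different from those in d1
--
--     """
--     keys1 = set(d1)
--     keys2 = set(d2)
--
--     new_keys = list(keys2.difference(keys1))
--     same_keys = list(keys1.intersection(keys2))
--
--     different_keys = []
--     for key in same_keys:
--         if d1[key] != d2[key]:
--             different_keys += [key]
--     return sorted(different_keys + new_keys)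
-- ===== SOURCE B (Python) =====
-- def dictionary_difference(d1, d2):
--     """Sorted-merge: walk the two sorted key lists with two pointers; when keys
--     match, keep the key only if the values differ; unmatched d2 keys are new.
--     The output is produced already in sorted order, with no final sort."""
--     ks1 = sorted(d1)
--     ks2 = sorted(d2)
--     out = []
--     i = j = 0
--     while j < len(ks2):
--         if i < len(ks1) and ks1[i] < ks2[j]:
--             i += 1
--         elif i < len(ks1) and ks1[i] == ks2[j]:
--             if d1[ks1[i]] != d2[ks2[j]]:
--                 out.append(ks2[j])
--             i += 1
--             j += 1
--         else:
--             out.append(ks2[j])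
--             j += 1
--     return out
-- ===== Notes on version B (the rewrite author's own statement) =====
-- stated objective: alternative
-- what changed: Replaces A's set-difference plus intersection-loop plus final sort with a sorted-merge: sort both key lists once and walk them with two pointers, emitting a d2 key when it is unmatched (new) or its values differ, so the output is produced already in order with no final sort.
import Mathlib
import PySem

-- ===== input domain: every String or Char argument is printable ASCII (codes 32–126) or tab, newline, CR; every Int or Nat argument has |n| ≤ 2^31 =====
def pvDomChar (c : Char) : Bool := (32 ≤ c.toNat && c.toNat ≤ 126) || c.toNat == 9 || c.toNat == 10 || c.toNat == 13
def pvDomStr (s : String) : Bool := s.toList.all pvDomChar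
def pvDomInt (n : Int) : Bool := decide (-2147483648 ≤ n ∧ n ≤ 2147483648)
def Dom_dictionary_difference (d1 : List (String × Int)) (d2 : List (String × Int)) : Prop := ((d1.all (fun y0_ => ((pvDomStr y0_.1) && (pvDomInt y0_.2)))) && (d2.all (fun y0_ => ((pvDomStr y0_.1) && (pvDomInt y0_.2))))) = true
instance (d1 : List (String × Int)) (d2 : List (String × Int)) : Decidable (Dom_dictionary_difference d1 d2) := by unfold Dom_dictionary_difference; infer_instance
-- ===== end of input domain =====

-- B replaces A's set-difference/intersection decomposition with a two-pointer merge over the two sorted key lists, emitting the result already in order with no final sort; objective: alternative.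


-- ===== PORT A =====
-- set-difference (new keys) plus a loop over the intersection (changed keys), then sorted
def dictionary_difference (d1 : List (String × Int)) (d2 : List (String × Int)) : List String :=
  let dd1 := PySem.Dict.ofList d1
  let dd2 := PySem.Dict.ofList d2
  let keys1 := PySem.Set.ofList dd1.keys
  let keys2 := PySem.Set.ofList dd2.keys
  let new_keys := PySem.Set.diff keys2 keys1
  let same_keys := PySem.Set.inter keys1 keys2
  let different_keys := same_keys.foldl
    (fun acc key => if dd1.getD key 0 != dd2.getD key 0 then acc ++ [key] else acc) []
  PySem.List.sorted (different_keys ++ new_keys) (fun x => x) false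

-- ===== PORT B =====
-- the two-pointer merge of Source B's while loop: advance in ks1 while its key is smaller,
-- on equal keys keep the key iff the dict values differ, otherwise the d2 key is new
def ddLoop (dd1 dd2 : PySem.Dict String Int) : List String → List String → List String
  | _, [] => []
  | [], k2 :: t2 => k2 :: ddLoop dd1 dd2 [] t2
  | k1 :: t1, k2 :: t2 =>
    if k1 < k2 then ddLoop dd1 dd2 t1 (k2 :: t2)
    else if k1 = k2 then
      (if dd1.getD k1 0 != dd2.getD k2 0 then [k2] else []) ++ ddLoop dd1 dd2 t1 t2
    else k2 :: ddLoop dd1 dd2 (k1 :: t1) t2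
  termination_by l1 l2 => l1.length + l2.length

-- sort the two key lists, then merge them with two pointers
def dictionary_difference_alt (d1 : List (String × Int)) (d2 : List (String × Int)) : List String :=
  let dd1 := PySem.Dict.ofList d1
  let dd2 := PySem.Dict.ofList d2
  let ks1 := PySem.List.sorted dd1.keys (fun x => x) false
  let ks2 := PySem.List.sorted dd2.keys (fun x => x) false
  ddLoop dd1 dd2 ks1 ks2

-- ===== PRECONDITION & SPEC =====
def Spec_dictionary_difference (d1 : List (String × Int)) (d2 : List (String × Int)) (out : List String) : Prop := out = dictionary_difference_alt d1 d2
instance (d1 : List (String × Int)) (d2 : List (String × Int)) (out : List String) : Decidable (Spec_dictionary_difference d1 d2 out) := by unfold Spec_dictionary_difference; infer_instance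

-- ===== CLAIM (what is proved, stated in full; the proofs are below) =====
def Claim_equal_dictionary_difference : Prop := ∀ (d1 : List (String × Int)) (d2 : List (String × Int)), Dom_dictionary_difference d1 d2 → Spec_dictionary_difference d1 d2 (dictionary_difference d1 d2)

-- ===== LEMMAS AND PROOFS =====

-- On strictly increasing key lists, the merge computes the filter of l2 by the combined predicate.
theorem ddLoop_eq_filter (dd1 dd2 : PySem.Dict String Int) :
    ∀ (l1 l2 : List String), l1.Pairwise (· < ·) → l2.Pairwise (· < ·) →
      ddLoop dd1 dd2 l1 l2 =
        l2.filter (fun k => !(decide (k ∈ l1)) || (dd1.getD k 0 != dd2.getD k 0)) := by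
  intro l1 l2 h1 h2
  induction l1, l2 using ddLoop.induct with
  | case1 l1 => simp [ddLoop]
  | case2 k2 t2 ih =>
    rw [ddLoop, ih List.Pairwise.nil (List.Pairwise.of_cons h2)]
    simp
  | case3 k1 t1 k2 t2 hlt ih =>
    rw [ddLoop, if_pos hlt, ih (List.Pairwise.of_cons h1) h2]
    apply List.filter_congr
    intro k hk
    have hk1 : k1 ≠ k := by
      rcases List.mem_cons.mp hk with rfl | hmem
      · exact ne_of_lt hlt
      · exact ne_of_lt (lt_trans hlt ((List.pairwise_cons.mp h2).1 _ hmem))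
    by_cases hm : k ∈ t1
    · simp [hm, List.mem_cons_of_mem k1 hm]
    · have hnc : k ∉ k1 :: t1 := by
        simp only [List.mem_cons, not_or]
        exact ⟨fun h => hk1 h.symm, hm⟩
      simp [hm, hnc]
  | case4 t1 k2 t2 hlt ih =>
    rw [ddLoop, if_neg hlt, if_pos rfl,
      ih (List.Pairwise.of_cons h1) (List.Pairwise.of_cons h2)]
    have hmem : k2 ∈ k2 :: t1 := List.mem_cons_self
    have htail : t2.filter (fun k => !(decide (k ∈ t1)) || (dd1.getD k 0 != dd2.getD k 0)) =
        t2.filter (fun k => !(decide (k ∈ k2 :: t1)) || (dd1.getD k 0 != dd2.getD k 0)) := by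
      apply List.filter_congr
      intro k hk
      have hk1 : k2 ≠ k := ne_of_lt ((List.pairwise_cons.mp h2).1 _ hk)
      by_cases hm : k ∈ t1
      · simp [hm, List.mem_cons_of_mem k2 hm]
      · have hnc : k ∉ k2 :: t1 := by
          simp only [List.mem_cons, not_or]
          exact ⟨fun h => hk1 h.symm, hm⟩
        simp [hm, hnc]
    rw [htail]
    simp only [List.filter_cons, hmem, decide_true, Bool.not_true, Bool.false_or]
    by_cases hv : dd1.getD k2 0 != dd2.getD k2 0
    · simp [hv]
    · simp only [Bool.not_eq_true, bne_eq_false_iff_eq] at hv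
      simp [hv]
  | case5 k1 t1 k2 t2 hlt hne ih =>
    rw [ddLoop, if_neg hlt, if_neg hne]
    have hk2lt : k2 < k1 := lt_of_le_of_ne (le_of_not_gt hlt) (Ne.symm hne)
    have hk2 : k2 ∉ k1 :: t1 := by
      intro hm
      rcases List.mem_cons.mp hm with rfl | hmem
      · exact hne rfl
      · exact absurd (lt_trans hk2lt ((List.pairwise_cons.mp h1).1 _ hmem)) (lt_irrefl k2)
    rw [ih h1 (List.Pairwise.of_cons h2)]
    have hd : decide (k2 ∈ k1 :: t1) = false := decide_eq_false hk2
    simp only [List.filter_cons, hd, Bool.not_false, Bool.true_or, if_true]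

-- A's loop body over the intersection is a filter.
theorem a_loop_eq_filter (d1 d2 : List (String × Int)) :
    dictionary_difference d1 d2 =
      PySem.List.sorted
        ((PySem.Set.inter (PySem.Set.ofList (PySem.Dict.ofList d1).keys)
            (PySem.Set.ofList (PySem.Dict.ofList d2).keys)).filter
            (fun k => (PySem.Dict.ofList d1).getD k 0 != (PySem.Dict.ofList d2).getD k 0) ++
          PySem.Set.diff (PySem.Set.ofList (PySem.Dict.ofList d2).keys)
            (PySem.Set.ofList (PySem.Dict.ofList d1).keys))
        (fun x => x) false := by
  unfold dictionary_difference
  dsimp only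
  rw [PySem.List.foldl_append_if_eq_filter]
  simp

-- A's two-part key list is a permutation of d2's keys filtered by the combined predicate.
theorem key_lists_perm (d1 d2 : List (String × Int)) :
    ((PySem.Set.inter (PySem.Set.ofList (PySem.Dict.ofList d1).keys)
        (PySem.Set.ofList (PySem.Dict.ofList d2).keys)).filter
        (fun k => (PySem.Dict.ofList d1).getD k 0 != (PySem.Dict.ofList d2).getD k 0) ++
      PySem.Set.diff (PySem.Set.ofList (PySem.Dict.ofList d2).keys)
        (PySem.Set.ofList (PySem.Dict.ofList d1).keys)).Perm
      ((PySem.Dict.ofList d2).keys.filter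
        (fun k => !((PySem.Dict.ofList d1).contains k) ||
          ((PySem.Dict.ofList d1).getD k 0 != (PySem.Dict.ofList d2).getD k 0))) := by
  apply (List.perm_ext_iff_of_nodup ?_ ?_).mpr
  · intro x
    simp only [List.mem_append, List.mem_filter, PySem.Set.mem_inter, PySem.Set.mem_diff,
      PySem.Set.mem_ofList, Bool.or_eq_true, Bool.not_eq_true',
      Bool.not_eq_true, ← PySem.Dict.contains_iff_mem_keys]
    by_cases h1 : (PySem.Dict.ofList d1).contains x
    · simp only [h1, PySem.Dict.contains_iff_mem_keys] at *
      tauto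
    · simp only [h1, PySem.Dict.contains_iff_mem_keys] at *
      tauto
  · apply List.Nodup.append
    · exact List.Nodup.filter _ (PySem.Set.nodup_inter _ _ (PySem.Set.nodup_ofList _))
    · exact PySem.Set.nodup_diff _ _ (PySem.Set.nodup_ofList _)
    · intro x hx hx'
      rcases List.mem_filter.mp hx with ⟨hmem, _⟩
      rcases (PySem.Set.mem_diff _ _ _).mp hx' with ⟨_, hnot⟩
      exact hnot ((PySem.Set.mem_inter _ _ _).mp hmem).1
  · exact List.Nodup.filter _ (PySem.Dict.nodup_keys_ofList d2)

-- sorted of a Nodup list is strictly increasing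
theorem sorted_keys_pairwise_lt (l : List String) (h : l.Nodup) :
    (PySem.List.sorted l (fun x => x) false).Pairwise (· < ·) := by
  have hle := PySem.List.sorted_pairwise (xs := l) (key := fun x => x)
  have hnd : (PySem.List.sorted l (fun x => x) false).Nodup :=
    (PySem.List.sorted_perm l _ false).nodup_iff.mpr h
  exact (hle.and hnd).imp (fun {a b} hab => lt_of_le_of_ne hab.1 hab.2)

-- B computes d2's sorted keys filtered by the combined predicate.
theorem alt_eq_filter_sorted (d1 d2 : List (String × Int)) :
    dictionary_difference_alt d1 d2 =
      (PySem.List.sorted (PySem.Dict.ofList d2).keys (fun x => x) false).filter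
        (fun k => !((PySem.Dict.ofList d1).contains k) ||
          ((PySem.Dict.ofList d1).getD k 0 != (PySem.Dict.ofList d2).getD k 0)) := by
  unfold dictionary_difference_alt
  dsimp only
  rw [ddLoop_eq_filter _ _ _ _
    (sorted_keys_pairwise_lt _ (PySem.Dict.nodup_keys_ofList d1))
    (sorted_keys_pairwise_lt _ (PySem.Dict.nodup_keys_ofList d2))]
  apply List.filter_congr
  intro k _
  have : decide (k ∈ PySem.List.sorted (PySem.Dict.ofList d1).keys (fun x => x) false) =
      (PySem.Dict.ofList d1).contains k := by
    simp only [PySem.List.mem_sorted]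
    by_cases h : k ∈ (PySem.Dict.ofList d1).keys
    · simp [h, (PySem.Dict.contains_iff_mem_keys _ _).mpr h]
    · simp only [h, decide_false]
      exact (Bool.not_eq_true _).mp (fun hc => h ((PySem.Dict.contains_iff_mem_keys _ _).mp hc)) |>.symm
  rw [this]

-- ===== VERDICT (by name: the statement is the Claim_ definition above) =====
theorem dictionary_difference_spec : Claim_equal_dictionary_difference := by
  intro d1 d2 _
  unfold Spec_dictionary_difference
  rw [a_loop_eq_filter, alt_eq_filter_sorted]
  apply PySem.List.sorted_eq_of_perm_of_pairwise_lt
  · exact (((PySem.List.sorted_perm (PySem.Dict.ofList d2).keys (fun x => x) false).filter _).trans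
      (key_lists_perm d1 d2).symm)
  · exact List.Pairwise.filter _
      (sorted_keys_pairwise_lt _ (PySem.Dict.nodup_keys_ofList d2))
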